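-- pv_equiv track=rewrite | github.com/giovannitarter/adventofcode | 2023/python/11/sol.py | row_map
-- ===== SOURCE A (Python) =====
-- def row_map(data, warp):
--     r_map = {}
--     cnt = 0
--     for y, row in enumerate(data):
--         if all([c == "." for c in row]):
--             cnt += (warp-1)
--         r_map[y] = cnt
--         cnt += 1
--     return r_map
-- ===== SOURCE B (Python) =====
-- def row_map(data, warp):
--     empties = [y for y, row in enumerate(data) if all(c == "." for c in row)]
--     r_map = {}
--     start = 0
--     for k, e in enumerate(empties):
--         for y in range(start, e):
--             r_map[y] = y + (warp - 1) * k
--         r_map[e] = e + (warp - 1) * (k + 1)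
--         start = e + 1
--     for y in range(start, len(data)):
--         r_map[y] = y + (warp - 1) * len(empties)
--     return r_map
-- ===== Notes on version B (the rewrite author's own statement) =====
-- stated objective: alternative
-- what changed: Instead of A's per-row running accumulator, B first collects the indices of all-'.' rows and then fills the dict segment-by-segment between consecutive empty indices with a constant offset.
import Mathlib
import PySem

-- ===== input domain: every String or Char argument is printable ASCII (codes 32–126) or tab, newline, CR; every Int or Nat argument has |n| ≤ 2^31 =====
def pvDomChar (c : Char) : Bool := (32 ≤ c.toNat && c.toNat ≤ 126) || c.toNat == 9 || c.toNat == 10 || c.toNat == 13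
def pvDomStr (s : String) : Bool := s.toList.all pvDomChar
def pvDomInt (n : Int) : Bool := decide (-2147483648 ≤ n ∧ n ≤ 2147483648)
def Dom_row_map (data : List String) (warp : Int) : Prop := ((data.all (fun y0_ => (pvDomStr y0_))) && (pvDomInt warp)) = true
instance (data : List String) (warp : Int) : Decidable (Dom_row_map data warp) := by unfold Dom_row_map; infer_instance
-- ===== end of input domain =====

-- B replaces A's per-row running accumulator by a segment algorithm: it first collects the
-- indices of all-'.' rows, then fills the map with constant-offset segments between them.

-- ===== PORT A =====
-- A: one loop threading a dict and a running counter cnt.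
def row_map (data : List String) (warp : Int) : List (Int × Int) :=
  ((PySem.List.enumerate data 0).foldl
    (fun (st : PySem.Dict Int Int × Int) (p : Int × String) =>
      let cnt := if (p.2.toList.map (fun c => c == '.')).all id then st.2 + (warp - 1) else st.2
      (st.1.insert p.1 cnt, cnt + 1))
    (PySem.Dict.empty, 0)).1.items

-- ===== PORT B =====
-- B: collect the indices of empty rows, then fill segment-by-segment between them.
def row_map_alt (data : List String) (warp : Int) : List (Int × Int) :=
  let empties := ((PySem.List.enumerate data 0).filter
    (fun p => p.2.toList.all (fun c => c == '.'))).map (fun p => p.1)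
  let st := (PySem.List.enumerate empties 0).foldl
    (fun (st : PySem.Dict Int Int × Int) (p : Int × Int) =>
      let d := (PySem.List.pyRange st.2 p.2 1).foldl
        (fun (d : PySem.Dict Int Int) y => d.insert y (y + (warp - 1) * p.1)) st.1
      (d.insert p.2 (p.2 + (warp - 1) * (p.1 + 1)), p.2 + 1))
    (PySem.Dict.empty, 0)
  ((PySem.List.pyRange st.2 (data.length : Int) 1).foldl
    (fun (d : PySem.Dict Int Int) y => d.insert y (y + (warp - 1) * (empties.length : Int))) st.1).items

-- ===== PRECONDITION & SPEC =====
def Spec_row_map (data : List String) (warp : Int) (out : List (Int × Int)) : Prop := out = row_map_alt data warp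
instance (data : List String) (warp : Int) (out : List (Int × Int)) : Decidable (Spec_row_map data warp out) := by unfold Spec_row_map; infer_instance

-- ===== CLAIM (what is proved, stated in full; the proofs are below) =====
def Claim_equal_row_map : Prop := ∀ (data : List String) (warp : Int), Dom_row_map data warp → Spec_row_map data warp (row_map data warp)

-- ===== LEMMAS AND PROOFS =====

def isEmp (row : String) : Bool := row.toList.all (fun c => c == '.')

-- inclusive count of empty rows among indices 0..i
def eCnt : List String → Nat → Int
  | [], _ => 0
  | row :: _, 0 => if isEmp row then 1 else 0
  | row :: rest, i+1 => (if isEmp row then 1 else 0) + eCnt rest i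

-- number of elements of L that are ≤ y
def cntLE (L : List Int) (y : Int) : Int := ((L.filter (fun e => decide (e ≤ y))).length : Int)

-- reference shape of A's loop output
def rmSpec (data : List String) (warp : Int) (s c : Int) : List (Int × Int) :=
  match data with
  | [] => []
  | row :: rest =>
    let c' := if row.toList.all (fun ch => ch == '.') then c + (warp - 1) else c
    (s, c') :: rmSpec rest warp (s + 1) (c' + 1)

lemma rowA_loop (data : List String) (warp : Int) (s c : Int) (d : PySem.Dict Int Int)
    (hd : ∀ k ∈ d.keys, k < s) :
    (((PySem.List.enumerate data s).foldl
      (fun (st : PySem.Dict Int Int × Int) (p : Int × String) =>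
        let cnt := if (p.2.toList.map (fun c => c == '.')).all id then st.2 + (warp - 1) else st.2
        (st.1.insert p.1 cnt, cnt + 1))
      (d, c)).1).items = d.items ++ rmSpec data warp s c := by
  induction data generalizing s c d with
  | nil => simp [PySem.List.enumerate_nil, rmSpec]
  | cons row rest ih =>
    rw [PySem.List.enumerate_cons, List.foldl_cons]
    have hnot : d.contains s = false := by
      rw [← Bool.not_eq_true, PySem.Dict.contains_iff_mem_keys]
      intro h
      exact absurd (hd s h) (lt_irrefl s)
    have hall : (row.toList.map (fun c => c == '.')).all id
        = row.toList.all (fun ch => ch == '.') := by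
      simp [List.all_map]
    simp only [hall]
    rw [ih _ _ _ (by
      intro k hk
      rw [PySem.Dict.mem_keys_insert] at hk
      rcases hk with h | h
      · omega
      · have := hd k h; omega)]
    rw [PySem.Dict.items_insert_of_not_contains _ _ hnot]
    simp [rmSpec]

lemma rmSpec_closed (data : List String) (warp : Int) (s c : Int) :
    rmSpec data warp s c
      = (List.range data.length).map
          (fun (i : Nat) => (s + (i : Int), c + (i : Int) + (warp - 1) * eCnt data i)) := by
  induction data generalizing s c with
  | nil => simp [rmSpec]
  | cons row rest ih =>
    rw [rmSpec, ih]
    simp only [List.length_cons]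
    rw [List.range_succ_eq_map, List.map_cons, List.map_map]
    refine List.cons_eq_cons.mpr ⟨?_, List.map_congr_left fun i _ => ?_⟩
    · simp only [eCnt, isEmp]
      split <;> simp
    · simp only [Function.comp, eCnt, isEmp]
      have : ((i + 1 : Nat) : Int) = (i : Int) + 1 := by push_cast; ring
      rw [this]
      split <;> simp only [Prod.mk.injEq] <;> constructor <;> ring

-- filling a contiguous range of fresh keys appends the corresponding pairs
lemma fill_items (a b : Int) (f : Int → Int) (d : PySem.Dict Int Int)
    (hd : ∀ k ∈ d.keys, k < a) :
    ((PySem.List.pyRange a b 1).foldl (fun d y => d.insert y (f y)) d).items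
      = d.items ++ (PySem.List.pyRange a b 1).map (fun y => (y, f y)) := by
  have h1 : ∀ y ∈ PySem.List.pyRange a b 1, d.contains ((fun y => y) y) = false := by
    intro y hy
    rw [PySem.List.mem_pyRange_one] at hy
    rw [← Bool.not_eq_true, PySem.Dict.contains_iff_mem_keys]
    intro h
    have := hd y h
    omega
  have h2 : ((PySem.List.pyRange a b 1).map (fun y => y)).Nodup := by
    simpa using PySem.List.nodup_pyRange_one a b
  simpa using PySem.Dict.items_foldl_insert_fresh (PySem.List.pyRange a b 1) (fun y => y) f d h1 h2

lemma fill_keys (a b : Int) (f : Int → Int) (d : PySem.Dict Int Int)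
    (hab : a ≤ b) (hd : ∀ k ∈ d.keys, k < a) :
    ∀ k ∈ ((PySem.List.pyRange a b 1).foldl (fun d y => d.insert y (f y)) d).keys, k < b := by
  intro k hk
  simp only [PySem.Dict.keys] at hk ⊢
  rw [fill_items a b f d hd] at hk
  simp only [List.map_append, List.mem_append, List.map_map] at hk
  rcases hk with h | h
  · exact lt_of_lt_of_le (hd k h) hab
  · simp only [List.mem_map] at h
    obtain ⟨y, hy, rfl⟩ := h
    exact (PySem.List.mem_pyRange_one.mp hy).2

-- B's loop body over one empty index (let-reduced form of the port's lambda)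
def segStep (warp : Int) (st : PySem.Dict Int Int × Int) (p : Int × Int) :
    PySem.Dict Int Int × Int :=
  (((PySem.List.pyRange st.2 p.2 1).foldl
      (fun (d : PySem.Dict Int Int) y => d.insert y (y + (warp - 1) * p.1)) st.1).insert
      p.2 (p.2 + (warp - 1) * (p.1 + 1)), p.2 + 1)

-- the segment loop of B, generalized
lemma segLoop (L : List Int) (warp n k0 s0 : Int) (d : PySem.Dict Int Int)
    (hL : L.Pairwise (· < ·)) (hge : ∀ e ∈ L, s0 ≤ e) (hlt : ∀ e ∈ L, e < n)
    (hd : ∀ k ∈ d.keys, k < s0) :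
    ((PySem.List.pyRange ((PySem.List.enumerate L k0).foldl (segStep warp) (d, s0)).2 n 1).foldl
      (fun (d : PySem.Dict Int Int) y => d.insert y (y + (warp - 1) * (k0 + (L.length : Int))))
      ((PySem.List.enumerate L k0).foldl (segStep warp) (d, s0)).1).items
      = d.items ++ (PySem.List.pyRange s0 n 1).map
          (fun y => (y, y + (warp - 1) * (k0 + cntLE L y))) := by
  induction L generalizing k0 s0 d with
  | nil =>
    rw [PySem.List.enumerate_nil, List.foldl_nil]
    rw [fill_items _ _ _ _ hd]
    simp [cntLE]
  | cons e rest ih =>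
    rw [PySem.List.enumerate_cons, List.foldl_cons]
    have hse : s0 ≤ e := hge e (List.mem_cons_self ..)
    have hen : e < n := hlt e (List.mem_cons_self ..)
    have hrest_gt : ∀ x ∈ rest, e < x := fun x hx => (List.pairwise_cons.mp hL).1 x hx
    -- the first step
    have hd1keys : ∀ k ∈ ((PySem.List.pyRange s0 e 1).foldl
        (fun (d : PySem.Dict Int Int) y => d.insert y (y + (warp - 1) * k0)) d).keys, k < e :=
      fill_keys s0 e _ d hse hd
    have hstep : segStep warp (d, s0) (k0, e)
        = (((PySem.List.pyRange s0 e 1).foldl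
            (fun (d : PySem.Dict Int Int) y => d.insert y (y + (warp - 1) * k0)) d).insert
            e (e + (warp - 1) * (k0 + 1)), e + 1) := rfl
    rw [hstep]
    have hcast : k0 + ((e :: rest).length : Int) = (k0 + 1) + (rest.length : Int) := by
      simp only [List.length_cons]
      push_cast
      ring
    rw [hcast]
    rw [ih (k0 + 1) (e + 1) _ (hL.of_cons)
      (fun x hx => by have := hrest_gt x hx; omega)
      (fun x hx => hlt x (List.mem_cons_of_mem _ hx))
      (by
        intro k hk
        rw [PySem.Dict.mem_keys_insert] at hk
        rcases hk with h | h
        · omega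
        · have := hd1keys k h; omega)]
    have hnotc : ((PySem.List.pyRange s0 e 1).foldl
        (fun (d : PySem.Dict Int Int) y => d.insert y (y + (warp - 1) * k0)) d).contains e = false := by
      rw [← Bool.not_eq_true, PySem.Dict.contains_iff_mem_keys]
      intro h
      exact absurd (hd1keys e h) (lt_irrefl e)
    rw [PySem.Dict.items_insert_of_not_contains _ _ hnotc]
    rw [fill_items _ _ _ _ hd]
    have hrest0 : ∀ y : Int, y ≤ e → (rest.filter (fun x => decide (x ≤ y))) = [] := by
      intro y hy
      rw [List.filter_eq_nil_iff]
      intro x hx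
      have := hrest_gt x hx
      simp only [decide_eq_true_eq]
      omega
    have h1 : (PySem.List.pyRange s0 e 1).map
          (fun y => (y, y + (warp - 1) * (k0 + cntLE (e :: rest) y)))
        = (PySem.List.pyRange s0 e 1).map (fun y => (y, y + (warp - 1) * k0)) := by
      refine List.map_congr_left fun y hy => ?_
      have hy' := PySem.List.mem_pyRange_one.mp hy
      have hc : cntLE (e :: rest) y = 0 := by
        simp only [cntLE, List.filter_cons, decide_eq_true_eq]
        rw [if_neg (by omega : ¬ (e ≤ y)), hrest0 y (by omega)]
        simp
      rw [hc, add_zero]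
    have h2 : cntLE (e :: rest) e = 1 := by
      simp only [cntLE, List.filter_cons, decide_eq_true_eq]
      rw [if_pos (le_refl e), hrest0 e (le_refl e)]
      simp
    have h3 : (PySem.List.pyRange (e + 1) n 1).map
          (fun y => (y, y + (warp - 1) * (k0 + cntLE (e :: rest) y)))
        = (PySem.List.pyRange (e + 1) n 1).map
          (fun y => (y, y + (warp - 1) * (k0 + 1 + cntLE rest y))) := by
      refine List.map_congr_left fun y hy => ?_
      have hy' := PySem.List.mem_pyRange_one.mp hy
      have hc : cntLE (e :: rest) y = 1 + cntLE rest y := by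
        simp only [cntLE, List.filter_cons, decide_eq_true_eq]
        rw [if_pos (by omega : e ≤ y)]
        simp only [List.length_cons]
        push_cast
        ring
      rw [hc]
      congr 1
      ring
    rw [PySem.List.pyRange_one_append s0 e n hse (le_of_lt hen),
        PySem.List.pyRange_one_cons hen]
    rw [List.map_append, List.map_cons, h1, h2, h3]
    simp [List.append_assoc]

-- the empty-row index list: elementwise bounds
lemma empties_bounds (data : List String) (off : Int) :
    ∀ e ∈ ((PySem.List.enumerate data off).filter
      (fun p => p.2.toList.all (fun c => c == '.'))).map (fun p => p.1),
      off ≤ e ∧ e < off + (data.length : Int) := by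
  intro e he
  simp only [List.mem_map] at he
  obtain ⟨p, hp, rfl⟩ := he
  have := (PySem.List.mem_enumerate_iff data off p).mp (List.mem_of_mem_filter hp)
  obtain ⟨k, hk, rfl⟩ := this
  have : (k : Int) < (data.length : Int) := by exact_mod_cast hk
  refine ⟨by simp, by simp; omega⟩

lemma empties_sorted (data : List String) (off : Int) :
    (((PySem.List.enumerate data off).filter
      (fun p => p.2.toList.all (fun c => c == '.'))).map (fun p => p.1)).Pairwise (· < ·) := by
  rw [List.pairwise_map]
  exact (PySem.List.pairwise_lt_enumerate data off).filter _

lemma cntLE_cons (x : Int) (L : List Int) (y : Int) :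
    cntLE (x :: L) y = (if x ≤ y then 1 else 0) + cntLE L y := by
  simp only [cntLE, List.filter_cons, decide_eq_true_eq]
  split
  · simp only [List.length_cons]
    push_cast
    ring
  · simp

lemma cntLE_eq_zero (L : List Int) (y : Int) (h : ∀ x ∈ L, y < x) : cntLE L y = 0 := by
  simp only [cntLE]
  rw [List.filter_eq_nil_iff.mpr (by intro x hx; simpa using not_le.mpr (h x hx))]
  rfl

-- counting empties ≤ off+i equals the inclusive prefix count eCnt
lemma cnt_empties (data : List String) (off : Int) (i : Nat) (h : i < data.length) :
    cntLE (((PySem.List.enumerate data off).filter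
      (fun p => p.2.toList.all (fun c => c == '.'))).map (fun p => p.1)) (off + (i : Int))
      = eCnt data i := by
  induction data generalizing off i with
  | nil => simp at h
  | cons row rest ih =>
    rw [PySem.List.enumerate_cons, List.filter_cons]
    have hb := empties_bounds rest (off + 1)
    have hE0 : ∀ y : Int, y < off + 1 →
        cntLE (((PySem.List.enumerate rest (off + 1)).filter
          (fun p => p.2.toList.all (fun c => c == '.'))).map (fun p => p.1)) y = 0 := by
      intro y hy
      exact cntLE_eq_zero _ _ (fun x hx => lt_of_lt_of_le hy (hb x hx).1)
    by_cases hrow : (row.toList.all (fun c => c == '.')) = true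
    · simp only [hrow, if_true, List.map_cons]
      rw [cntLE_cons]
      rw [if_pos (by omega : off ≤ off + (i : Int))]
      cases i with
      | zero =>
        simp only [Nat.cast_zero, add_zero]
        rw [hE0 off (by omega)]
        simp [eCnt, isEmp, hrow]
      | succ j =>
        have hcast : off + ((j + 1 : Nat) : Int) = (off + 1) + (j : Int) := by push_cast; ring
        rw [hcast, ih (off + 1) j (by simpa using Nat.lt_of_succ_lt_succ h)]
        simp [eCnt, isEmp, hrow]
    · rw [if_neg (by simp [hrow])]
      cases i with
      | zero =>
        simp only [Nat.cast_zero, add_zero]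
        rw [hE0 off (by omega)]
        simp [eCnt, isEmp, hrow]
      | succ j =>
        have hcast : off + ((j + 1 : Nat) : Int) = (off + 1) + (j : Int) := by push_cast; ring
        rw [hcast, ih (off + 1) j (by simpa using Nat.lt_of_succ_lt_succ h)]
        simp [eCnt, isEmp, hrow]

-- ===== VERDICT (by name: the statement is the Claim_ definition above) =====
theorem row_map_spec : Claim_equal_row_map := by
  intro data warp _
  show row_map data warp = row_map_alt data warp
  rw [row_map, row_map_alt]
  rw [rowA_loop data warp 0 0 PySem.Dict.empty (by simp [PySem.Dict.empty, PySem.Dict.keys])]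
  rw [rmSpec_closed]
  have hlam : (fun (st : PySem.Dict Int Int × Int) (p : Int × Int) =>
      let d := (PySem.List.pyRange st.2 p.2 1).foldl
        (fun (d : PySem.Dict Int Int) y => d.insert y (y + (warp - 1) * p.1)) st.1
      (d.insert p.2 (p.2 + (warp - 1) * (p.1 + 1)), p.2 + 1)) = segStep warp := rfl
  rw [hlam]
  have hb := empties_bounds data 0
  have hzlen : ((((PySem.List.enumerate data 0).filter
      (fun p => p.2.toList.all (fun c => c == '.'))).map (fun p => p.1)).length : Int)
    = 0 + ((((PySem.List.enumerate data 0).filter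
      (fun p => p.2.toList.all (fun c => c == '.'))).map (fun p => p.1)).length : Int) := by ring
  rw [hzlen]
  rw [segLoop _ warp (data.length : Int) 0 0 PySem.Dict.empty
        (empties_sorted data 0)
        (fun e he => (hb e he).1)
        (fun e he => by have := (hb e he).2; omega)
        (by simp [PySem.Dict.empty, PySem.Dict.keys])]
  simp only [PySem.Dict.empty, List.nil_append]
  rw [PySem.List.pyRange_zero_natCast]
  rw [List.map_map]
  refine List.map_congr_left fun i hi => ?_
  have hi' : i < data.length := List.mem_range.mp hi
  have hc := cnt_empties data 0 i hi'
  rw [zero_add] at hc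
  simp only [Function.comp]
  rw [hc]
  simp
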